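-- pv_equiv track=rewrite | github.com/gavinmagnus69/math4course | lab8/main.py | add_empty_edges
-- ===== SOURCE A (Python) =====
-- from collections import deque, defaultdict
-- from typing import Dict
--
-- GraphFlow = Dict[str, Dict[str, int]]
--
-- def add_empty_edges(edges):
--     ost_flow: GraphFlow = defaultdict(dict)
--     nodes = set()
--
--     for u, v, w in edges:
--         nodes.add(u)
--         nodes.add(v)
--         ost_flow[u].setdefault(v, 0)
--         ost_flow[u][v] += w
--
--     for u in list(nodes):
--         ost_flow.setdefault(u, {})
--
--     for u in list(ost_flow):
--         for v in list(ost_flow[u]):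
--             ost_flow.setdefault(v, {})
--             ost_flow[v].setdefault(u, 0)
--
--     return ost_flow
-- ===== SOURCE B (Python) =====
-- from collections import defaultdict
--
--
-- def add_empty_edges(edges):
--     # One pass to index the graph (flat (u,v)->weight map, per-node successor
--     # lists, node order), then assemble each node's adjacency row directly.
--     weight = {}                # (u, v) -> summed capacity
--     succ = defaultdict(list)   # u -> forward targets, first-occurrence order
--     order = []                 # sources first, then sink-only nodes
--     seen = set()
--     for u, v, w in edges:
--         if (u, v) in weight:
--             weight[(u, v)] += w
--         else:
--             weight[(u, v)] = w
--             succ[u].append(v)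
--         if u not in seen:
--             seen.add(u)
--             order.append(u)
--     for u, v, w in edges:
--         if v not in seen:
--             seen.add(v)
--             order.append(v)
--     pred = defaultdict(list)   # v -> forward sources, in node order
--     for u in order:
--         for v in succ[u]:
--             pred[v].append(u)
--     g = defaultdict(dict)
--     for x in order:
--         row = {v: weight[(x, v)] for v in succ[x]}
--         for u in pred[x]:
--             if (x, u) not in weight:
--                 row[u] = 0
--         g[x] = row
--     return g
-- ===== Notes on version B (the rewrite author's own statement) =====
-- stated objective: alternative
-- what changed: B replaces A's three mutating passes over nested dicts (accumulate forward edges + node set, ensure node keys, scan dicts inserting reverse zero edges) with one indexing pass building a flat (u,v)->weight map, successor/predecessor adjacency lists and an explicit node order, and then assembles each node's adjacency row directly without ever touching another node's dict.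
import Mathlib
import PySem

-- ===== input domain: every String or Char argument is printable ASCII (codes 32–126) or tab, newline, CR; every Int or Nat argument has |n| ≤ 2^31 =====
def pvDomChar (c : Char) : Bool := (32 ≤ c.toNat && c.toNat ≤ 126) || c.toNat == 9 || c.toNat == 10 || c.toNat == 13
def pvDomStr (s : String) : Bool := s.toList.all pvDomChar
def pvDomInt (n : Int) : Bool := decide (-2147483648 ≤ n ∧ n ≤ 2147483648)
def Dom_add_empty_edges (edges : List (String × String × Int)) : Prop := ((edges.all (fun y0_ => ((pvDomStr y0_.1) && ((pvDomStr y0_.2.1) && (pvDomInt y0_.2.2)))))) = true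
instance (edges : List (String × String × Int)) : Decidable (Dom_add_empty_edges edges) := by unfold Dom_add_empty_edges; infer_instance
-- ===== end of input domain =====

-- B replaces A's three dict-mutating passes by one indexing pass (flat (u,v)→weight map,
-- successor/predecessor lists, explicit node order) and then assembles each node's
-- adjacency row directly; alternative decomposition, same O(E+V) cost.

-- ===== PORT A =====
-- loop body of A's first pass: collect endpoints, ost_flow[u].setdefault(v, 0); ost_flow[u][v] += w
def aStep1 (st : PySem.Dict String (PySem.Dict String Int) × PySem.Set String)
    (e : String × String × Int) :
    PySem.Dict String (PySem.Dict String Int) × PySem.Set String :=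
  let nodes := PySem.Set.add (PySem.Set.add st.2 e.1) e.2.1
  let inner := st.1.getD e.1 PySem.Dict.empty
  let inner := inner.setdefault e.2.1 0
  let inner := inner.modify e.2.1 0 (· + e.2.2)
  (st.1.insert e.1 inner, nodes)

-- loop body of A's second pass: ost_flow.setdefault(u, {})
def aStep2 (d : PySem.Dict String (PySem.Dict String Int)) (u : String) :
    PySem.Dict String (PySem.Dict String Int) :=
  d.setdefault u PySem.Dict.empty

-- inner body of A's third pass: ost_flow.setdefault(v, {}); ost_flow[v].setdefault(u, 0)
def aStep3Inner (u : String) (d : PySem.Dict String (PySem.Dict String Int)) (v : String) :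
    PySem.Dict String (PySem.Dict String Int) :=
  let d := d.setdefault v PySem.Dict.empty
  d.insert v ((d.getD v PySem.Dict.empty).setdefault u 0)

-- outer body of A's third pass: for v in list(ost_flow[u]): …
def aStep3 (d : PySem.Dict String (PySem.Dict String Int)) (u : String) :
    PySem.Dict String (PySem.Dict String Int) :=
  ((d.getD u PySem.Dict.empty).keys).foldl (aStep3Inner u) d

def add_empty_edges (edges : List (String × String × Int)) : List (String × List (String × Int)) :=
  let st := edges.foldl aStep1
    ((PySem.Dict.empty : PySem.Dict String (PySem.Dict String Int)), (PySem.Set.empty : PySem.Set String))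
  let d2 := st.2.foldl aStep2 st.1
  let d3 := d2.keys.foldl aStep3 d2
  d3.items.map (fun p => (p.1, p.2.items))

-- ===== PORT B =====
-- loop body of B's indexing pass over the edges
def bStep1 (st : PySem.Dict (String × String) Int × PySem.Dict String (List String) × List String × PySem.Set String)
    (e : String × String × Int) :
    PySem.Dict (String × String) Int × PySem.Dict String (List String) × List String × PySem.Set String :=
  let ws : PySem.Dict (String × String) Int × PySem.Dict String (List String) :=
    if st.1.contains (e.1, e.2.1) then (st.1.modify (e.1, e.2.1) 0 (· + e.2.2), st.2.1)
    else (st.1.insert (e.1, e.2.1) e.2.2, st.2.1.modify e.1 [] (· ++ [e.2.1]))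
  let os : List String × PySem.Set String :=
    if st.2.2.2.contains e.1 then (st.2.2.1, st.2.2.2)
    else (st.2.2.1 ++ [e.1], PySem.Set.add st.2.2.2 e.1)
  (ws.1, ws.2, os.1, os.2)

-- loop body of B's second pass: append sink-only nodes
def bStep2 (os : List String × PySem.Set String) (e : String × String × Int) :
    List String × PySem.Set String :=
  if os.2.contains e.2.1 then os else (os.1 ++ [e.2.1], PySem.Set.add os.2 e.2.1)

def add_empty_edges_alt (edges : List (String × String × Int)) : List (String × List (String × Int)) :=
  let st := edges.foldl bStep1
    ((PySem.Dict.empty : PySem.Dict (String × String) Int),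
     (PySem.Dict.empty : PySem.Dict String (List String)), ([] : List String),
     (PySem.Set.empty : PySem.Set String))
  let weight := st.1
  let succ := st.2.1
  let os2 := edges.foldl bStep2 (st.2.2.1, st.2.2.2)
  let order := os2.1
  let pred := order.foldl (fun pred u =>
      (succ.getD u []).foldl (fun pred v => pred.modify v [] (· ++ [u])) pred)
    (PySem.Dict.empty : PySem.Dict String (List String))
  let g := order.foldl (fun g x =>
      let row := (succ.getD x []).foldl
          (fun (row : PySem.Dict String Int) v => row.insert v (weight.getD (x, v) 0))
          PySem.Dict.empty
      let row := (pred.getD x []).foldl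
          (fun row u => if weight.contains (x, u) then row else row.insert u 0) row
      g.insert x row)
    (PySem.Dict.empty : PySem.Dict String (PySem.Dict String Int))
  g.items.map (fun p => (p.1, p.2.items))

-- ===== PRECONDITION & SPEC =====
def Spec_add_empty_edges (edges : List (String × String × Int)) (out : List (String × List (String × Int))) : Prop := out = add_empty_edges_alt edges
instance (edges : List (String × String × Int)) (out : List (String × List (String × Int))) : Decidable (Spec_add_empty_edges edges out) := by unfold Spec_add_empty_edges; infer_instance

-- ===== CLAIM (what is proved, stated in full; the proofs are below) =====
def Claim_equal_add_empty_edges : Prop := ∀ (edges : List (String × String × Int)), Dom_add_empty_edges edges → Spec_add_empty_edges edges (add_empty_edges edges)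

-- ===== LEMMAS AND PROOFS =====

-- Canonical description of the common result, used to meet the two ports in the middle.
-- sources in first-occurrence order
def pvSrcs (es : List (String × String × Int)) : List String :=
  PySem.Set.ofList (es.map (·.1))
-- distinct forward targets of x, first-occurrence order
def pvTgts (es : List (String × String × Int)) (x : String) : List String :=
  PySem.Set.ofList ((es.filter (fun e => e.1 == x)).map (fun e => e.2.1))
-- summed capacity of edge x→v
def pvW (es : List (String × String × Int)) (x v : String) : Int :=
  ((es.filter (fun e => e.1 == x && e.2.1 == v)).map (fun e => e.2.2)).sum
-- all nodes: sources first, then sink-only nodes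
def pvNodes (es : List (String × String × Int)) : List String :=
  PySem.Set.update (pvSrcs es) (es.map (fun e => e.2.1))
-- forward part of x's row
def pvFwd (es : List (String × String × Int)) (x : String) : List (String × Int) :=
  (pvTgts es x).map (fun v => (v, pvW es x v))
-- reverse zero-capacity part of x's row, for the processed prefix P of the node order
def pvZeros (es : List (String × String × Int)) (P : List String) (x : String) : List (String × Int) :=
  (P.filter (fun u => (pvTgts es u).contains x && !((pvTgts es x).contains u))).map (fun u => (u, 0))
-- the common output
def pvOut (es : List (String × String × Int)) : List (String × List (String × Int)) :=
  (pvNodes es).map (fun x => (x, pvFwd es x ++ pvZeros es (pvNodes es) x))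

lemma mem_pvTgts {es : List (String × String × Int)} {x v : String} :
    v ∈ pvTgts es x ↔ (x, v) ∈ es.map (fun e => (e.1, e.2.1)) := by
  simp only [pvTgts, PySem.Set.mem_ofList, List.mem_map, List.mem_filter, beq_iff_eq,
    Prod.mk.injEq]
  constructor
  · rintro ⟨e, ⟨he, h1⟩, h2⟩; exact ⟨e, he, h1, h2⟩
  · rintro ⟨e, he, h1, h2⟩; exact ⟨e, ⟨he, h1⟩, h2⟩

lemma pvSrcs_append (es : List (String × String × Int)) (e : String × String × Int) :
    pvSrcs (es ++ [e]) = PySem.Set.add (pvSrcs es) e.1 := by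
  simp [pvSrcs, PySem.Set.ofList_append_singleton]

lemma pvTgts_append (es : List (String × String × Int)) (e : String × String × Int) (x : String) :
    pvTgts (es ++ [e]) x =
      if e.1 = x then PySem.Set.add (pvTgts es x) e.2.1 else pvTgts es x := by
  by_cases h : e.1 = x <;>
    simp [pvTgts, List.filter_append, h, PySem.Set.ofList_append_singleton]

lemma pvW_append (es : List (String × String × Int)) (e : String × String × Int) (x v : String) :
    pvW (es ++ [e]) x v = pvW es x v + (if e.1 = x ∧ e.2.1 = v then e.2.2 else 0) := by
  by_cases h1 : e.1 = x <;> by_cases h2 : e.2.1 = v <;>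
    simp [pvW, List.filter_append, h1, h2]

lemma pvW_eq_zero_of_not_mem {es : List (String × String × Int)} {x v : String}
    (h : v ∉ pvTgts es x) : pvW es x v = 0 := by
  have hfilter : es.filter (fun e => e.1 == x && e.2.1 == v) = [] := by
    rw [List.filter_eq_nil_iff]
    intro e he hmem
    simp only [Bool.and_eq_true, beq_iff_eq] at hmem
    exact h (mem_pvTgts.mpr (by simp only [List.mem_map]; exact ⟨e, he, by simp [hmem.1, hmem.2]⟩))
  simp [pvW, hfilter]

lemma b1_char (es : List (String × String × Int)) :
    (∀ x v, (es.foldl bStep1 ((PySem.Dict.empty : PySem.Dict (String × String) Int),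
     (PySem.Dict.empty : PySem.Dict String (List String)), ([] : List String),
     (PySem.Set.empty : PySem.Set String))).1.getD (x, v) 0 = pvW es x v)
  ∧ (∀ x v, (es.foldl bStep1 ((PySem.Dict.empty : PySem.Dict (String × String) Int),
     (PySem.Dict.empty : PySem.Dict String (List String)), ([] : List String),
     (PySem.Set.empty : PySem.Set String))).1.contains (x, v) = decide (v ∈ pvTgts es x))
  ∧ (∀ x, (es.foldl bStep1 ((PySem.Dict.empty : PySem.Dict (String × String) Int),
     (PySem.Dict.empty : PySem.Dict String (List String)), ([] : List String),
     (PySem.Set.empty : PySem.Set String))).2.1.getD x [] = pvTgts es x)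
  ∧ (es.foldl bStep1 ((PySem.Dict.empty : PySem.Dict (String × String) Int),
     (PySem.Dict.empty : PySem.Dict String (List String)), ([] : List String),
     (PySem.Set.empty : PySem.Set String))).2.2.1 = pvSrcs es
  ∧ (es.foldl bStep1 ((PySem.Dict.empty : PySem.Dict (String × String) Int),
     (PySem.Dict.empty : PySem.Dict String (List String)), ([] : List String),
     (PySem.Set.empty : PySem.Set String))).2.2.2 = pvSrcs es := by
  induction es using List.reverseRecOn with
  | nil =>
      refine ⟨fun x v => ?_, fun x v => ?_, fun x => ?_, rfl, rfl⟩
      · simp [PySem.Dict.getD_empty, pvW]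
      · simp [PySem.Dict.contains_empty, pvTgts]
      · simp [pvTgts, PySem.Dict.getD_empty]
  | append_singleton es e ih =>
      obtain ⟨ihW, ihC, ihS, ihO, ihSeen⟩ := ih
      rw [List.foldl_append, List.foldl_cons, List.foldl_nil]
      set st := es.foldl bStep1 ((PySem.Dict.empty : PySem.Dict (String × String) Int),
     (PySem.Dict.empty : PySem.Dict String (List String)), ([] : List String),
     (PySem.Set.empty : PySem.Set String)) with hst
      have hcont : st.1.contains (e.1, e.2.1) = decide (e.2.1 ∈ pvTgts es e.1) := ihC e.1 e.2.1
      have hseen : st.2.2.2.contains e.1 = decide (e.1 ∈ pvSrcs es) := by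
        rw [ihSeen]; by_cases h : e.1 ∈ pvSrcs es <;> simp [h]
      refine ⟨fun x v => ?_, fun x v => ?_, fun x => ?_, ?_, ?_⟩
      · -- weight getD
        show (bStep1 st e).1.getD (x, v) 0 = _
        rw [pvW_append]
        by_cases hp : e.2.1 ∈ pvTgts es e.1
        · have hc : st.1.contains (e.1, e.2.1) = true := by rw [hcont]; exact decide_eq_true hp
          simp only [bStep1, hc, if_pos]
          rw [PySem.Dict.getD_modify]
          by_cases hpe : (x, v) = (e.1, e.2.1)
          · have h1 : x = e.1 := congrArg Prod.fst hpe
            have h2 : v = e.2.1 := congrArg Prod.snd hpe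
            subst h1; subst h2
            rw [if_pos rfl, if_pos ⟨rfl, rfl⟩, ihW]
          · have hne : ¬ (e.1 = x ∧ e.2.1 = v) := by
              rintro ⟨h1, h2⟩; exact hpe (by rw [h1, h2])
            rw [if_neg hpe, if_neg hne, add_zero, ihW]
        · have hc : st.1.contains (e.1, e.2.1) = false := by
            rw [hcont]; exact decide_eq_false hp
          simp only [bStep1, hc, Bool.false_eq_true, if_false]
          rw [PySem.Dict.getD_insert]
          by_cases hpe : (x, v) = (e.1, e.2.1)
          · have h1 : x = e.1 := congrArg Prod.fst hpe
            have h2 : v = e.2.1 := congrArg Prod.snd hpe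
            subst h1; subst h2
            rw [if_pos rfl, if_pos ⟨rfl, rfl⟩, pvW_eq_zero_of_not_mem hp, zero_add]
          · have hne : ¬ (e.1 = x ∧ e.2.1 = v) := by
              rintro ⟨h1, h2⟩; exact hpe (by rw [h1, h2])
            rw [if_neg hpe, if_neg hne, add_zero, ihW]
      · -- weight contains
        show (bStep1 st e).1.contains (x, v) = _
        by_cases hp : e.2.1 ∈ pvTgts es e.1
        · have hc : st.1.contains (e.1, e.2.1) = true := by rw [hcont]; exact decide_eq_true hp
          simp only [bStep1, hc, if_pos]
          rw [PySem.Dict.contains_modify, ihC, pvTgts_append]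
          by_cases hx : e.1 = x
          · subst hx
            rw [if_pos rfl, PySem.Set.add_of_mem hp]
            by_cases hv : v = e.2.1
            · subst hv; simp [hp]
            · have hb : ((e.1, v) == (e.1, e.2.1)) = false := by simp [hv]
              rw [hb, Bool.false_or]
          · rw [if_neg hx]
            have hb : ((x, v) == (e.1, e.2.1)) = false := by
              simp only [beq_eq_false_iff_ne, ne_eq, Prod.mk.injEq, not_and]
              intro h; exact absurd h.symm hx
            rw [hb, Bool.false_or]
        · have hc : st.1.contains (e.1, e.2.1) = false := by
            rw [hcont]; exact decide_eq_false hp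
          simp only [bStep1, hc, Bool.false_eq_true, if_false]
          rw [PySem.Dict.contains_insert, ihC, pvTgts_append]
          by_cases hx : e.1 = x
          · subst hx
            rw [if_pos rfl]
            by_cases hv : v = e.2.1
            · subst hv; simp [PySem.Set.mem_add]
            · have hb : ((e.1, v) == (e.1, e.2.1)) = false := by simp [hv]
              rw [hb, Bool.false_or]
              simp [PySem.Set.mem_add, hv]
          · rw [if_neg hx]
            have hb : ((x, v) == (e.1, e.2.1)) = false := by
              simp only [beq_eq_false_iff_ne, ne_eq, Prod.mk.injEq, not_and]
              intro h; exact absurd h.symm hx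
            rw [hb, Bool.false_or]
      · -- succ component
        show (bStep1 st e).2.1.getD x [] = _
        rw [pvTgts_append]
        by_cases hp : e.2.1 ∈ pvTgts es e.1
        · have hc : st.1.contains (e.1, e.2.1) = true := by rw [hcont]; exact decide_eq_true hp
          simp only [bStep1, hc, if_pos]
          rw [ihS]
          by_cases hx : e.1 = x
          · subst hx
            rw [if_pos rfl, PySem.Set.add_of_mem hp]
          · rw [if_neg hx]
        · have hc : st.1.contains (e.1, e.2.1) = false := by
            rw [hcont]; exact decide_eq_false hp
          simp only [bStep1, hc, Bool.false_eq_true, if_false]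
          rw [PySem.Dict.getD_modify, ihS, ihS]
          by_cases hx : x = e.1
          · subst hx
            rw [if_pos rfl, if_pos rfl, PySem.Set.add_of_not_mem hp]
          · rw [if_neg hx, if_neg (fun h => hx h.symm)]
      · -- order component
        show (bStep1 st e).2.2.1 = _
        rw [pvSrcs_append]
        by_cases h : e.1 ∈ pvSrcs es
        · have hc : st.2.2.2.contains e.1 = true := by rw [hseen]; exact decide_eq_true h
          simp only [bStep1, hc, if_pos]
          rw [ihO, PySem.Set.add_of_mem h]
        · have hc : st.2.2.2.contains e.1 = false := by rw [hseen]; exact decide_eq_false h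
          simp only [bStep1, hc, Bool.false_eq_true, if_false]
          rw [ihO, PySem.Set.add_of_not_mem h]
      · -- seen component
        show (bStep1 st e).2.2.2 = _
        rw [pvSrcs_append]
        by_cases h : e.1 ∈ pvSrcs es
        · have hc : st.2.2.2.contains e.1 = true := by rw [hseen]; exact decide_eq_true h
          simp only [bStep1, hc, if_pos]
          rw [ihSeen, PySem.Set.add_of_mem h]
        · have hc : st.2.2.2.contains e.1 = false := by rw [hseen]; exact decide_eq_false h
          simp only [bStep1, hc, Bool.false_eq_true, if_false]
          rw [ihSeen, PySem.Set.add_of_not_mem h]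

lemma b2_char (es : List (String × String × Int)) :
    ∀ s : PySem.Set String, s.Nodup →
      es.foldl bStep2 (s, s) =
        (PySem.Set.update s (es.map (fun e => e.2.1)), PySem.Set.update s (es.map (fun e => e.2.1))) := by
  induction es with
  | nil => intro s _; simp [PySem.Set.update]
  | cons e es ih =>
      intro s hs
      rw [List.foldl_cons, List.map_cons, PySem.Set.update_cons]
      by_cases h : e.2.1 ∈ s
      · have hc : s.contains e.2.1 = true := by simp [h]
        have hb : bStep2 (s, s) e = (s, s) := by simp [bStep2, h]
        rw [hb, PySem.Set.add_of_mem h]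
        exact ih s hs
      · have hc : s.contains e.2.1 = false := by simp [h]
        have hb : bStep2 (s, s) e = (s ++ [e.2.1], PySem.Set.add s e.2.1) := by
          simp [bStep2, h]
        rw [hb, PySem.Set.add_of_not_mem h]
        exact ih (s ++ [e.2.1]) (by
          simp only [List.nodup_append, List.nodup_singleton, true_and]
          constructor
          · exact hs
          · intro a ha b hb
            rw [List.mem_singleton] at hb
            exact fun hab => h ((hab.trans hb) ▸ ha))

lemma filter_beq_of_nodup (S : List String) (x : String) (h : S.Nodup) :
    S.filter (· == x) = if x ∈ S then [x] else [] := by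
  induction S with
  | nil => simp
  | cons a S ih =>
      rw [List.nodup_cons] at h
      by_cases hax : a = x
      · subst hax
        have : S.filter (· == a) = [] := by
          rw [List.filter_eq_nil_iff]
          intro b hb hba
          exact h.1 ((beq_iff_eq.mp hba) ▸ hb)
        simp [this]
      · simp only [List.filter_cons, List.mem_cons]
        have : (a == x) = false := by simpa using hax
        rw [this]
        simp only [Bool.false_eq_true, if_false, ih h.2]
        by_cases hxS : x ∈ S
        · simp [hxS]
        · simp [hxS]
          intro hh
          exact hax hh.symm

lemma predInner_getD (u x : String) (S : List String) (d : PySem.Dict String (List String))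
    (hS : S.Nodup) :
    (S.foldl (fun pred v => pred.modify v [] (· ++ [u])) d).getD x [] =
      d.getD x [] ++ (if x ∈ S then [u] else []) := by
  have h1 : S.foldl (fun pred v => pred.modify v [] (· ++ [u])) d =
      (S.map (fun v => (v, u))).foldl (fun d p => d.modify p.1 [] (· ++ [p.2])) d := by
    rw [List.foldl_map]
  rw [h1, PySem.Dict.getD_foldl_modify_append]
  congr 1
  rw [List.filter_map]
  have : ((fun p => p.1 == x) ∘ fun v => (v, u)) = (· == x) := rfl
  rw [this, filter_beq_of_nodup S x hS, ]
  by_cases hxS : x ∈ S <;> simp [hxS]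

lemma pred_char (order : List String) (succ : PySem.Dict String (List String))
    (hS : ∀ u, (succ.getD u []).Nodup) :
    ∀ (d : PySem.Dict String (List String)) (x : String),
      ((order.foldl (fun pred u =>
          (succ.getD u []).foldl (fun pred v => pred.modify v [] (· ++ [u])) pred) d)).getD x []
        = d.getD x [] ++ order.filter (fun u => (succ.getD u []).contains x) := by
  induction order with
  | nil => intro d x; simp
  | cons u order ih =>
      intro d x
      rw [List.foldl_cons, ih, predInner_getD u x _ d (hS u), List.filter_cons]
      by_cases hx : x ∈ succ.getD u []
      · have : (succ.getD u []).contains x = true := by simp [hx]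
        rw [this]
        simp [hx]
      · have : (succ.getD u []).contains x = false := by simp [hx]
        rw [this]
        simp [hx]
lemma contains_eq_decide (l : List String) (a : String) : l.contains a = decide (a ∈ l) := by
  by_cases h : a ∈ l <;> simp [h]

lemma nodup_pvSrcs (es : List (String × String × Int)) : (pvSrcs es).Nodup :=
  PySem.Set.nodup_ofList _

lemma nodup_pvTgts (es : List (String × String × Int)) (x : String) : (pvTgts es x).Nodup :=
  PySem.Set.nodup_ofList _

lemma nodup_pvNodes (es : List (String × String × Int)) : (pvNodes es).Nodup :=
  PySem.Set.nodup_update _ _ (nodup_pvSrcs es)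

lemma bRow_items (es : List (String × String × Int))
    (weight : PySem.Dict (String × String) Int) (succ pred : PySem.Dict String (List String))
    (x : String)
    (hW : ∀ x v, weight.getD (x, v) 0 = pvW es x v)
    (hC : ∀ x v, weight.contains (x, v) = decide (v ∈ pvTgts es x))
    (hS : ∀ x, succ.getD x [] = pvTgts es x)
    (hP : ∀ x, pred.getD x [] = (pvNodes es).filter (fun u => (pvTgts es u).contains x)) :
    ((pred.getD x []).foldl
        (fun row u => if weight.contains (x, u) then row else row.insert u 0)
        ((succ.getD x []).foldl
          (fun (row : PySem.Dict String Int) v => row.insert v (weight.getD (x, v) 0))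
          PySem.Dict.empty)).items
      = pvFwd es x ++ pvZeros es (pvNodes es) x := by
  -- forward part
  have hfwd : ((succ.getD x []).foldl
      (fun (row : PySem.Dict String Int) v => row.insert v (weight.getD (x, v) 0))
      PySem.Dict.empty).items = pvFwd es x := by
    rw [hS, PySem.Dict.items_foldl_insert_fresh (pvTgts es x) (fun v => v)
      (fun v => weight.getD (x, v) 0) PySem.Dict.empty
      (fun a _ => PySem.Dict.contains_empty a) (by simpa using nodup_pvTgts es x)]
    have hni : (PySem.Dict.empty : PySem.Dict String Int).items = [] := rfl
    rw [hni, List.nil_append, pvFwd]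
    exact List.map_congr_left (fun v _ => by rw [hW])
  set rowF := ((succ.getD x []).foldl
      (fun (row : PySem.Dict String Int) v => row.insert v (weight.getD (x, v) 0))
      PySem.Dict.empty) with hrowF
  have hkeysF : rowF.keys = pvTgts es x := by
    show rowF.items.map (·.1) = _
    rw [hfwd, pvFwd, List.map_map]
    have hcomp : ((fun p => p.1) ∘ fun v => ((v, pvW es x v) : String × Int)) = id := rfl
    rw [hcomp, List.map_id]
  have hcontF : ∀ u, rowF.contains u = decide (u ∈ pvTgts es x) := by
    intro u
    by_cases h : u ∈ pvTgts es x
    · simp [PySem.Dict.contains_iff_mem_keys, hkeysF, h]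
    · simp only [h, decide_false]
      rw [Bool.eq_false_iff]
      intro hc
      exact h (hkeysF ▸ (PySem.Dict.contains_iff_mem_keys rowF u).mp hc)
  -- zero part
  have hstep : ∀ (row : PySem.Dict String Int) (u : String),
      (if weight.contains (x, u) then row else row.insert u 0) =
      (if !((pvTgts es x).contains u) then row.insert u 0 else row) := by
    intro row u
    rw [hC, contains_eq_decide]
    by_cases h : u ∈ pvTgts es x <;> simp [h]
  rw [PySem.List.foldl_congr_mem _ _ _ _ (fun row u _ => hstep row u),
    PySem.List.foldl_if_eq_foldl_filter, hP]
  rw [List.filter_filter]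
  have hzs : ((pvNodes es).filter
      (fun u => (pvTgts es u).contains x && !(pvTgts es x).contains u)) =
      ((pvNodes es).filter (fun a => !(pvTgts es x).contains a && (pvTgts es a).contains x)) := by
    apply List.filter_congr
    intro u _
    cases h1 : (pvTgts es u).contains x <;> cases h2 : (pvTgts es x).contains u <;> rfl
  rw [← hzs]
  rw [PySem.Dict.items_foldl_insert_fresh _ (fun u => u) (fun _ => (0 : Int)) rowF ?fresh ?nd]
  case fresh =>
    intro u hu
    rw [List.mem_filter] at hu
    rw [hcontF]
    simp only [decide_eq_false_iff_not]
    intro hmem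
    have := hu.2
    rw [contains_eq_decide] at this
    simp [hmem] at this
  case nd =>
    simpa using (nodup_pvNodes es).filter _
  rw [hfwd]
  rfl
lemma bAssemble (es : List (String × String × Int))
    (weight : PySem.Dict (String × String) Int) (succ pred : PySem.Dict String (List String))
    (hW : ∀ x v, weight.getD (x, v) 0 = pvW es x v)
    (hC : ∀ x v, weight.contains (x, v) = decide (v ∈ pvTgts es x))
    (hS : ∀ x, succ.getD x [] = pvTgts es x)
    (hP : ∀ x, pred.getD x [] = (pvNodes es).filter (fun u => (pvTgts es u).contains x)) :
    (((pvNodes es).foldl (fun g x =>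
        let row := (succ.getD x []).foldl
            (fun (row : PySem.Dict String Int) v => row.insert v (weight.getD (x, v) 0))
            PySem.Dict.empty
        let row := (pred.getD x []).foldl
            (fun row u => if weight.contains (x, u) then row else row.insert u 0) row
        g.insert x row)
      (PySem.Dict.empty : PySem.Dict String (PySem.Dict String Int))).items).map
        (fun p => (p.1, p.2.items)) = pvOut es := by
  show ((List.foldl (fun g x => g.insert x
      ((pred.getD x []).foldl
          (fun row u => if weight.contains (x, u) then row else row.insert u 0)
          ((succ.getD x []).foldl
            (fun (row : PySem.Dict String Int) v => row.insert v (weight.getD (x, v) 0))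
            PySem.Dict.empty)))
      PySem.Dict.empty (pvNodes es)).items).map (fun p => (p.1, p.2.items)) = pvOut es
  rw [PySem.Dict.items_foldl_insert_fresh (pvNodes es) (fun x => x) _ PySem.Dict.empty
    (fun a _ => PySem.Dict.contains_empty a) (by simpa using nodup_pvNodes es)]
  have hni : (PySem.Dict.empty : PySem.Dict String (PySem.Dict String Int)).items = [] := rfl
  rw [hni, List.nil_append, List.map_map, pvOut]
  apply List.map_congr_left
  intro x _
  show (x, _) = (x, pvFwd es x ++ pvZeros es (pvNodes es) x)
  rw [bRow_items es weight succ pred x hW hC hS hP]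

theorem portB_eq_pvOut (es : List (String × String × Int)) :
    add_empty_edges_alt es = pvOut es := by
  obtain ⟨ihW, ihC, ihS, ihO, ihSeen⟩ := b1_char es
  simp only [add_empty_edges_alt]
  rw [ihO, ihSeen]
  have h2 : es.foldl bStep2 (pvSrcs es, pvSrcs es) = (pvNodes es, pvNodes es) :=
    b2_char es (pvSrcs es) (nodup_pvSrcs es)
  rw [h2]
  apply bAssemble es _ _ _ ihW ihC ihS
  intro x
  have hnd : ∀ u, (((es.foldl bStep1 ((PySem.Dict.empty : PySem.Dict (String × String) Int),
     (PySem.Dict.empty : PySem.Dict String (List String)), ([] : List String),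
     (PySem.Set.empty : PySem.Set String))).2.1).getD u []).Nodup := by
    intro u; rw [ihS]; exact nodup_pvTgts es u
  rw [pred_char (pvNodes es) _ hnd PySem.Dict.empty x]
  have hni : (PySem.Dict.empty : PySem.Dict String (List String)).getD x [] = [] := rfl
  rw [hni, List.nil_append]
  apply List.filter_congr
  intro u _
  rw [ihS]


lemma setdefault_of_contains {κ ν : Type} [BEq κ] (d : PySem.Dict κ ν) (k : κ) (v : ν)
    (hc : d.contains k = true) : d.setdefault k v = d := by
  unfold PySem.Dict.setdefault
  rw [hc]
  rfl

lemma setdefault_of_not_contains {κ ν : Type} [BEq κ] (d : PySem.Dict κ ν) (k : κ) (v : ν)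
    (hc : d.contains k = false) : d.setdefault k v = d.insert k v := by
  unfold PySem.Dict.setdefault PySem.Dict.insert
  rw [hc]
  rfl

lemma insert_self_of_contains {κ ν : Type} [BEq κ] [LawfulBEq κ] (d : PySem.Dict κ ν) (k : κ)
    (dflt : ν) (hnd : d.keys.Nodup) (hc : d.contains k = true) :
    d.insert k (d.getD k dflt) = d := by
  apply PySem.Dict.ext
  rw [PySem.Dict.items_insert_of_contains d _ hc]
  have : ∀ p ∈ d.items, (if (p.1 == k) = true then (k, d.getD k dflt) else p) = p := by
    intro p hp
    by_cases h : p.1 = k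
    · have hb : (p.1 == k) = true := beq_iff_eq.mpr h
      rw [if_pos hb]
      have : d.getD p.1 dflt = p.2 := PySem.Dict.getD_of_mem_items d hp hnd dflt
      rw [← h, this]
    · rw [if_neg (by simpa using h)]
  rw [List.map_congr_left this]
  simp

lemma mem_pvSrcs {es : List (String × String × Int)} {x : String} :
    x ∈ pvSrcs es ↔ ∃ e ∈ es, e.1 = x := by
  simp [pvSrcs, PySem.Set.mem_ofList, List.mem_map, eq_comm]

lemma tgts_src {es : List (String × String × Int)} {u v : String}
    (h : u ∈ pvTgts es v) : v ∈ pvSrcs es := by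
  obtain ⟨e, he, h1⟩ := List.mem_map.mp (mem_pvTgts.mp h)
  exact mem_pvSrcs.mpr ⟨e, he, congrArg Prod.fst h1⟩

lemma not_src_tgts {es : List (String × String × Int)} {x : String}
    (h : x ∉ pvSrcs es) : pvTgts es x = [] := by
  rw [List.eq_nil_iff_forall_not_mem]
  intro v hv
  exact h (tgts_src hv)

lemma srcs_sub_nodes {es : List (String × String × Int)} {x : String}
    (h : x ∈ pvSrcs es) : x ∈ pvNodes es := by
  rw [pvNodes]
  exact (PySem.Set.mem_update _ _ _).mpr (Or.inl h)

lemma tgts_sub_nodes {es : List (String × String × Int)} {u v : String}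
    (h : v ∈ pvTgts es u) : v ∈ pvNodes es := by
  obtain ⟨e, he, h1⟩ := List.mem_map.mp (mem_pvTgts.mp h)
  rw [pvNodes]
  refine (PySem.Set.mem_update _ _ _).mpr (Or.inr ?_)
  exact List.mem_map.mpr ⟨e, he, congrArg Prod.snd h1⟩

lemma aFold1_split (es : List (String × String × Int)) :
    ∀ st : PySem.Dict String (PySem.Dict String Int) × PySem.Set String,
      es.foldl aStep1 st =
        (es.foldl (fun d e => d.insert e.1
            (((d.getD e.1 PySem.Dict.empty).setdefault e.2.1 0).modify e.2.1 0 (· + e.2.2))) st.1,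
         es.foldl (fun s e => PySem.Set.add (PySem.Set.add s e.1) e.2.1) st.2) := by
  induction es with
  | nil => intro st; rfl
  | cons e es ih =>
      intro st
      rw [List.foldl_cons, ih]
      rfl

lemma aNodes_char (es : List (String × String × Int)) :
    ∀ s : PySem.Set String,
      es.foldl (fun s e => PySem.Set.add (PySem.Set.add s e.1) e.2.1) s =
        PySem.Set.update s (es.flatMap (fun e => [e.1, e.2.1])) := by
  induction es with
  | nil => intro s; rfl
  | cons e es ih =>
      intro s
      rw [List.foldl_cons, ih, List.flatMap_cons]
      have : ([e.1, e.2.1] ++ es.flatMap (fun e => [e.1, e.2.1])) =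
          e.1 :: e.2.1 :: es.flatMap (fun e => [e.1, e.2.1]) := rfl
      rw [this, PySem.Set.update_cons, PySem.Set.update_cons]

lemma aD1_keys (es : List (String × String × Int)) :
    (es.foldl (fun d e => d.insert e.1
        (((d.getD e.1 PySem.Dict.empty).setdefault e.2.1 0).modify e.2.1 0 (· + e.2.2)))
      PySem.Dict.empty).keys = pvSrcs es := by
  rw [PySem.Dict.keys_foldl_insert_key es (fun e => e.1) _ PySem.Dict.empty]
  show PySem.Set.update PySem.Set.empty (es.map (fun e => e.1)) = pvSrcs es
  rw [PySem.Set.update_empty]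
  rfl

lemma aD1_rows (es : List (String × String × Int)) :
    ∀ x, ((es.foldl (fun d e => d.insert e.1
        (((d.getD e.1 PySem.Dict.empty).setdefault e.2.1 0).modify e.2.1 0 (· + e.2.2)))
      PySem.Dict.empty).getD x PySem.Dict.empty).items = pvFwd es x := by
  induction es using List.reverseRecOn with
  | nil =>
      intro x
      have h0 : ((PySem.Dict.empty : PySem.Dict String (PySem.Dict String Int)).getD x
          PySem.Dict.empty) = PySem.Dict.empty := PySem.Dict.getD_empty _ _
      rw [List.foldl_nil, h0]
      show ([] : List (String × Int)) = _
      simp [pvFwd, pvTgts]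
  | append_singleton es e ih =>
      intro x
      rw [List.foldl_append, List.foldl_cons, List.foldl_nil]
      set d := es.foldl (fun d e => d.insert e.1
        (((d.getD e.1 PySem.Dict.empty).setdefault e.2.1 0).modify e.2.1 0 (· + e.2.2)))
        PySem.Dict.empty with hd
      -- the current row of e.1 and its properties
      have hrow : (d.getD e.1 PySem.Dict.empty).items = pvFwd es e.1 := ih e.1
      have hkeys : (d.getD e.1 PySem.Dict.empty).keys = pvTgts es e.1 := by
        show (d.getD e.1 PySem.Dict.empty).items.map (·.1) = _
        rw [hrow, pvFwd, List.map_map]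
        have : ((fun p => p.1) ∘ fun v => ((v, pvW es e.1 v) : String × Int)) = id := rfl
        rw [this, List.map_id]
      have hndrow : (d.getD e.1 PySem.Dict.empty).keys.Nodup := by
        rw [hkeys]; exact nodup_pvTgts es e.1
      by_cases hx : x = e.1
      · subst hx
        rw [PySem.Dict.getD_insert, if_pos rfl]
        by_cases hv : e.2.1 ∈ pvTgts es e.1
        · -- existing target: setdefault is a no-op, the entry is updated in place
          have hc : (d.getD e.1 PySem.Dict.empty).contains e.2.1 = true := by
            rw [PySem.Dict.contains_iff_mem_keys, hkeys]; exact hv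
          rw [setdefault_of_contains _ _ _ hc]
          show ((d.getD e.1 PySem.Dict.empty).insert e.2.1
            ((d.getD e.1 PySem.Dict.empty).getD e.2.1 0 + e.2.2)).items = _
          rw [PySem.Dict.items_insert_of_contains _ _ hc, hrow]
          have hval : (d.getD e.1 PySem.Dict.empty).getD e.2.1 0 = pvW es e.1 e.2.1 := by
            apply PySem.Dict.getD_of_mem_items _ _ hndrow
            rw [hrow, pvFwd]
            exact List.mem_map.mpr ⟨e.2.1, hv, rfl⟩
          rw [hval, pvFwd, pvFwd, pvTgts_append, if_pos rfl, PySem.Set.add_of_mem hv,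
            List.map_map]
          apply List.map_congr_left
          intro v hvv
          by_cases hve : v = e.2.1
          · subst hve
            have hb : (((e.2.1, pvW es e.1 e.2.1) : String × Int).1 == e.2.1) = true := by simp
            simp only [Function.comp_apply, hb, if_pos]
            rw [pvW_append]
            simp
          · have : (((v, pvW es e.1 v) : String × Int).1 == e.2.1) = false := by simpa using hve
            simp only [Function.comp_apply, this, Bool.false_eq_true, if_false]
            rw [pvW_append, if_neg (by rintro ⟨h1, h2⟩; exact hve h2.symm), add_zero]
        · -- new target: setdefault appends it with 0, then it is bumped to w
          have hc : (d.getD e.1 PySem.Dict.empty).contains e.2.1 = false := by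
            rw [Bool.eq_false_iff]
            intro hcc
            exact hv (hkeys ▸ (PySem.Dict.contains_iff_mem_keys _ _).mp hcc)
          rw [setdefault_of_not_contains _ _ _ hc]
          set r' := (d.getD e.1 PySem.Dict.empty).insert e.2.1 0 with hr'
          have hc' : r'.contains e.2.1 = true := PySem.Dict.contains_insert_self _ _ _
          show (r'.insert e.2.1 (r'.getD e.2.1 0 + e.2.2)).items = _
          have hval : r'.getD e.2.1 0 = 0 := by
            rw [hr', PySem.Dict.getD_insert, if_pos rfl]
          rw [hval, PySem.Dict.items_insert_of_contains _ _ hc', hr',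
            PySem.Dict.items_insert_of_not_contains _ _ hc, hrow]
          rw [List.map_append, pvFwd, pvFwd, pvTgts_append, if_pos rfl,
            PySem.Set.add_of_not_mem hv, List.map_append]
          congr 1
          · rw [List.map_map]
            apply List.map_congr_left
            intro v hvv
            have hve : v ≠ e.2.1 := fun h => hv (h ▸ hvv)
            have : (((v, pvW es e.1 v) : String × Int).1 == e.2.1) = false := by simpa using hve
            simp only [Function.comp_apply, this, Bool.false_eq_true, if_false]
            rw [pvW_append, if_neg (by rintro ⟨h1, h2⟩; exact hve h2.symm), add_zero]
          · simp only [List.map_cons, List.map_nil, beq_self_eq_true, if_pos]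
            rw [pvW_append, if_pos ⟨rfl, rfl⟩, pvW_eq_zero_of_not_mem hv, zero_add]
      · rw [PySem.Dict.getD_insert, if_neg hx, ih x, pvFwd, pvFwd, pvTgts_append,
          if_neg (fun h => hx h.symm)]
        apply List.map_congr_left
        intro v hvv
        rw [pvW_append, if_neg (by rintro ⟨h1, h2⟩; exact hx h1.symm), add_zero]

def pvD1 (es : List (String × String × Int)) : PySem.Dict String (PySem.Dict String Int) :=
  es.foldl (fun d e => d.insert e.1
      (((d.getD e.1 PySem.Dict.empty).setdefault e.2.1 0).modify e.2.1 0 (· + e.2.2)))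
    PySem.Dict.empty

def pvInter (es : List (String × String × Int)) : List String :=
  es.flatMap (fun e => [e.1, e.2.1])

def pvD2 (es : List (String × String × Int)) : PySem.Dict String (PySem.Dict String Int) :=
  (PySem.Set.ofList (pvInter es)).foldl aStep2 (pvD1 es)

lemma pvD1_keys (es : List (String × String × Int)) : (pvD1 es).keys = pvSrcs es := aD1_keys es

lemma pvD1_rows (es : List (String × String × Int)) :
    ∀ x, ((pvD1 es).getD x PySem.Dict.empty).items = pvFwd es x := aD1_rows es

lemma pvD1_contains (es : List (String × String × Int)) (x : String) :
    (pvD1 es).contains x = decide (x ∈ pvSrcs es) := by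
  by_cases h : x ∈ pvSrcs es
  · simp only [h, decide_true]
    exact (PySem.Dict.contains_iff_mem_keys _ _).mpr (pvD1_keys es ▸ h)
  · simp only [h, decide_false]
    rw [Bool.eq_false_iff]
    intro hc
    exact h (pvD1_keys es ▸ (PySem.Dict.contains_iff_mem_keys _ _).mp hc)

lemma aFold2_items (l : List String) (hl : l.Nodup) :
    ∀ d : PySem.Dict String (PySem.Dict String Int),
      (l.foldl aStep2 d).items =
        d.items ++ (l.filter (fun u => !d.contains u)).map (fun u => (u, PySem.Dict.empty)) := by
  induction l with
  | nil => intro d; simp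
  | cons u l ih =>
      intro d
      rw [List.nodup_cons] at hl
      rw [List.foldl_cons, List.filter_cons]
      by_cases hc : d.contains u = true
      · have hstep : aStep2 d u = d := setdefault_of_contains _ _ _ hc
        rw [hstep, ih hl.2 d, hc]
        rfl
      · rw [Bool.not_eq_true] at hc
        have hstep : aStep2 d u = d.insert u PySem.Dict.empty :=
          setdefault_of_not_contains _ _ _ hc
        rw [hstep, ih hl.2 _, PySem.Dict.items_insert_of_not_contains _ _ hc]
        have hfc : l.filter (fun u' => !(d.insert u PySem.Dict.empty).contains u') =
            l.filter (fun u' => !d.contains u') := by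
          apply List.filter_congr
          intro u' hu'
          rw [PySem.Dict.contains_insert]
          have : (u' == u) = false := by
            rw [beq_eq_false_iff_ne]
            intro h
            exact hl.1 (h ▸ hu')
          rw [this, Bool.false_or]
        rw [hfc, hc]
        simp

lemma ofList_filter (l : List String) (p : String → Bool) :
    (PySem.Set.ofList l).filter p = PySem.Set.ofList (l.filter p) := by
  induction l using List.reverseRecOn with
  | nil => rfl
  | append_singleton l x ih =>
      rw [List.filter_append, PySem.Set.ofList_append_singleton]
      by_cases hx : x ∈ PySem.Set.ofList l
      · rw [PySem.Set.add_of_mem hx]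
        by_cases hp : p x = true
        · have hxl : x ∈ l := (PySem.Set.mem_ofList _ _).mp hx
          have hmem : x ∈ PySem.Set.ofList (l.filter p) :=
            (PySem.Set.mem_ofList _ _).mpr (List.mem_filter.mpr ⟨hxl, hp⟩)
          have hfx : List.filter p [x] = [x] := by simp [hp]
          rw [hfx, PySem.Set.ofList_append_singleton, PySem.Set.add_of_mem hmem]
          exact ih
        · rw [show List.filter p [x] = [] by simp [hp], List.append_nil, ih]
      · rw [PySem.Set.add_of_not_mem hx, List.filter_append, ih]
        by_cases hp : p x = true
        · rw [show List.filter p [x] = [x] by simp [hp], PySem.Set.ofList_append_singleton]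
          have hxl : x ∉ l := fun h => hx ((PySem.Set.mem_ofList _ _).mpr h)
          have : x ∉ PySem.Set.ofList (l.filter p) := fun h =>
            hxl (List.mem_filter.mp ((PySem.Set.mem_ofList _ _).mp h)).1
          rw [PySem.Set.add_of_not_mem this]
        · rw [show List.filter p [x] = [] by simp [hp], List.append_nil, List.append_nil]

lemma inter_filter (es : List (String × String × Int)) (p : String → Bool)
    (hp : ∀ e ∈ es, p e.1 = false) :
    (pvInter es).filter p = (es.map (fun e => e.2.1)).filter p := by
  induction es with
  | nil => rfl
  | cons e es ih =>
      have h1 : pvInter (e :: es) = e.1 :: e.2.1 :: pvInter es := rfl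
      rw [h1, List.map_cons, List.filter_cons, List.filter_cons, List.filter_cons,
        hp e List.mem_cons_self]
      have := ih (fun e' he' => hp e' (List.mem_cons_of_mem _ he'))
      by_cases h2 : p e.2.1 = true <;> simp [h2, this]

lemma aFold2_keys (l : List String) (hl : l.Nodup) :
    ∀ d : PySem.Dict String (PySem.Dict String Int),
      (l.foldl aStep2 d).keys = d.keys ++ l.filter (fun u => !d.contains u) := by
  induction l with
  | nil => intro d; simp
  | cons u l ih =>
      intro d
      rw [List.nodup_cons] at hl
      rw [List.foldl_cons, List.filter_cons]
      by_cases hc : d.contains u = true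
      · have hstep : aStep2 d u = d := setdefault_of_contains _ _ _ hc
        rw [hstep, ih hl.2 d, hc]
        rfl
      · rw [Bool.not_eq_true] at hc
        have hstep : aStep2 d u = d.insert u PySem.Dict.empty :=
          setdefault_of_not_contains _ _ _ hc
        rw [hstep, ih hl.2 _, PySem.Dict.keys_insert_of_not_contains _ _ hc]
        have hfc : l.filter (fun u' => !(d.insert u PySem.Dict.empty).contains u') =
            l.filter (fun u' => !d.contains u') := by
          apply List.filter_congr
          intro u' hu'
          rw [PySem.Dict.contains_insert]
          have : (u' == u) = false := by
            rw [beq_eq_false_iff_ne]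
            intro h
            exact hl.1 (h ▸ hu')
          rw [this, Bool.false_or]
        rw [hfc, hc]
        simp

lemma pvD2_keys (es : List (String × String × Int)) : (pvD2 es).keys = pvNodes es := by
  unfold pvD2
  rw [aFold2_keys _ (PySem.Set.nodup_ofList _) (pvD1 es), pvD1_keys]
  have hfc : (PySem.Set.ofList (pvInter es)).filter (fun u => !(pvD1 es).contains u) =
      (PySem.Set.ofList (pvInter es)).filter (fun u => !(pvSrcs es).contains u) := by
    apply List.filter_congr
    intro u _
    rw [pvD1_contains, contains_eq_decide]
  rw [hfc, ofList_filter, inter_filter es _ ?hp, ← ofList_filter]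
  case hp =>
    intro e he
    have : e.1 ∈ pvSrcs es := mem_pvSrcs.mpr ⟨e, he, rfl⟩
    simp [this]
  rw [pvNodes, PySem.Set.update_eq_append_filter]
  rfl

lemma pvD2_rows (es : List (String × String × Int)) :
    ∀ x, ((pvD2 es).getD x PySem.Dict.empty).items = pvFwd es x := by
  intro x
  have hnd2 : (pvD2 es).keys.Nodup := by rw [pvD2_keys]; exact nodup_pvNodes es
  have hitems : (pvD2 es).items = (pvD1 es).items ++
      ((PySem.Set.ofList (pvInter es)).filter (fun u => !(pvD1 es).contains u)).map
        (fun u => (u, PySem.Dict.empty)) := by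
    unfold pvD2
    exact aFold2_items _ (PySem.Set.nodup_ofList _) (pvD1 es)
  by_cases hsrc : x ∈ pvSrcs es
  · have hx1 : (x, (pvD1 es).getD x PySem.Dict.empty) ∈ (pvD1 es).items := by
      rw [PySem.Dict.items_eq_map_keys (pvD1 es) (by rw [pvD1_keys]; exact nodup_pvSrcs es)
        PySem.Dict.empty]
      exact List.mem_map.mpr ⟨x, pvD1_keys es ▸ hsrc, rfl⟩
    have hx2 : (x, (pvD1 es).getD x PySem.Dict.empty) ∈ (pvD2 es).items := by
      rw [hitems]; exact List.mem_append_left _ hx1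
    rw [PySem.Dict.getD_of_mem_items _ hx2 hnd2]
    exact pvD1_rows es x
  · have hfwd : pvFwd es x = [] := by
      rw [pvFwd, not_src_tgts hsrc]; rfl
    by_cases hnode : x ∈ pvNodes es
    · have hxk : x ∈ pvSrcs es ++ (PySem.Set.ofList (pvInter es)).filter
          (fun u => !(pvD1 es).contains u) := by
        have h := pvD2_keys es ▸ hnode
        rw [show (pvD2 es).keys = pvSrcs es ++ (PySem.Set.ofList (pvInter es)).filter
            (fun u => !(pvD1 es).contains u) by
          unfold pvD2
          rw [aFold2_keys _ (PySem.Set.nodup_ofList _) (pvD1 es), pvD1_keys]] at h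
        exact h
      have hxf : x ∈ (PySem.Set.ofList (pvInter es)).filter
          (fun u => !(pvD1 es).contains u) :=
        (List.mem_append.mp hxk).resolve_left hsrc
      have hx2 : (x, (PySem.Dict.empty : PySem.Dict String Int)) ∈
          (pvD2 es).items := by
        rw [hitems]
        exact List.mem_append_right _ (List.mem_map.mpr ⟨x, hxf, rfl⟩)
      rw [PySem.Dict.getD_of_mem_items _ hx2 hnd2, hfwd]
      rfl
    · have hc : (pvD2 es).contains x = false := by
        rw [Bool.eq_false_iff]
        intro hcc
        exact hnode (pvD2_keys es ▸ (PySem.Dict.contains_iff_mem_keys _ _).mp hcc)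
      rw [PySem.Dict.getD_of_not_contains _ _ hc, hfwd]
      rfl

lemma map_fst_mk (L : List String) (f : String → Int) :
    (L.map (fun v => ((v, f v) : String × Int))).map (·.1) = L := by
  induction L with
  | nil => rfl
  | cons a L ih => simp only [List.map_cons, ih]

lemma row_keys (es : List (String × String × Int)) (P : List String) (x : String)
    (d : PySem.Dict String (PySem.Dict String Int))
    (hrow : (d.getD x PySem.Dict.empty).items = pvFwd es x ++ pvZeros es P x) :
    (d.getD x PySem.Dict.empty).keys =
      pvTgts es x ++ P.filter (fun w => (pvTgts es w).contains x && !((pvTgts es x).contains w)) := by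
  show (d.getD x PySem.Dict.empty).items.map (·.1) = _
  rw [hrow, List.map_append]
  congr 1
  · exact map_fst_mk _ _
  · exact map_fst_mk _ _

lemma ite_mem_snoc {x v u : String} {S : List String} {b : Bool} (hxv : x ≠ v) :
    (if x ∈ S ++ [v] ∧ b = false then [((u, 0) : String × Int)] else []) =
    (if x ∈ S ∧ b = false then [((u, 0) : String × Int)] else []) := by
  by_cases hxS : x ∈ S <;> by_cases hb : b = false <;>
    simp [List.mem_append, hxS, hb, hxv]

lemma pvZeros_append (es : List (String × String × Int)) (P : List String) (u x : String) :
    pvZeros es (P ++ [u]) x = pvZeros es P x ++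
      (if ((pvTgts es u).contains x && !((pvTgts es x).contains u)) = true
        then [((u, 0) : String × Int)] else []) := by
  simp only [pvZeros, List.filter_append, List.map_append]
  congr 1
  by_cases h1 : x ∈ pvTgts es u <;> by_cases h2 : u ∈ pvTgts es x <;>
    simp [h1, h2]

lemma a3_zeros_noop (u : String) :
    ∀ (zs : List String) (d : PySem.Dict String (PySem.Dict String Int)),
      d.keys.Nodup →
      (∀ v ∈ zs, d.contains v = true ∧ (d.getD v PySem.Dict.empty).contains u = true) →
      zs.foldl (aStep3Inner u) d = d := by
  intro zs
  induction zs with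
  | nil => intro d _ _; rfl
  | cons v zs ih =>
      intro d hnd h
      rw [List.foldl_cons]
      have h1 := h v List.mem_cons_self
      have hstep : aStep3Inner u d v = d := by
        show (d.setdefault v PySem.Dict.empty).insert v
            (((d.setdefault v PySem.Dict.empty).getD v PySem.Dict.empty).setdefault u 0) = _
        rw [setdefault_of_contains _ _ _ h1.1, setdefault_of_contains _ _ _ h1.2]
        exact insert_self_of_contains d v PySem.Dict.empty hnd h1.1
      rw [hstep]
      exact ih d hnd (fun v' hv' => h v' (List.mem_cons_of_mem _ hv'))

lemma a3_tgts (es : List (String × String × Int)) (u : String) (P : List String)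
    (huP : u ∉ P) :
    ∀ (rest S : List String) (d : PySem.Dict String (PySem.Dict String Int)),
      pvTgts es u = S ++ rest →
      d.keys = pvNodes es →
      (∀ x, (d.getD x PySem.Dict.empty).items =
        (pvFwd es x ++ pvZeros es P x) ++
          (if x ∈ S ∧ (pvTgts es x).contains u = false then [((u, 0) : String × Int)] else [])) →
      (rest.foldl (aStep3Inner u) d).keys = pvNodes es ∧
      ∀ x, ((rest.foldl (aStep3Inner u) d).getD x PySem.Dict.empty).items =
        (pvFwd es x ++ pvZeros es P x) ++
          (if x ∈ pvTgts es u ∧ (pvTgts es x).contains u = false then [((u, 0) : String × Int)] else []) := by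
  intro rest
  induction rest with
  | nil =>
      intro S d hTS hkeys hrows
      rw [List.append_nil] at hTS
      subst hTS
      exact ⟨hkeys, hrows⟩
  | cons v rest ih =>
      intro S d hTS hkeys hrows
      rw [List.foldl_cons]
      have hvT : v ∈ pvTgts es u := by
        rw [hTS]; exact List.mem_append_right _ List.mem_cons_self
      have hvN : v ∈ pvNodes es := tgts_sub_nodes hvT
      have hndN : (pvNodes es).Nodup := nodup_pvNodes es
      have hndT : (S ++ v :: rest).Nodup := hTS ▸ nodup_pvTgts es u
      have hvS : v ∉ S := by
        rw [List.nodup_append] at hndT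
        exact fun hv => hndT.2.2 v hv v List.mem_cons_self rfl
      have hcdv : d.contains v = true :=
        (PySem.Dict.contains_iff_mem_keys _ _).mpr (hkeys ▸ hvN)
      have hrowv : (d.getD v PySem.Dict.empty).items = pvFwd es v ++ pvZeros es P v := by
        have := hrows v
        rw [if_neg (by rintro ⟨h1, _⟩; exact hvS h1), List.append_nil] at this
        exact this
      have hkeysv := row_keys es P v d hrowv
      have hstep : aStep3Inner u d v =
          d.insert v ((d.getD v PySem.Dict.empty).setdefault u 0) := by
        show (d.setdefault v PySem.Dict.empty).insert v
            (((d.setdefault v PySem.Dict.empty).getD v PySem.Dict.empty).setdefault u 0) = _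
        rw [setdefault_of_contains _ _ _ hcdv]
      have hTS' : pvTgts es u = (S ++ [v]) ++ rest := by
        rw [hTS, List.append_assoc]; rfl
      by_cases hcu : (pvTgts es v).contains u = true
      · -- u is already a forward target of v: the whole step is a no-op
        have hcru : (d.getD v PySem.Dict.empty).contains u = true := by
          rw [PySem.Dict.contains_iff_mem_keys, hkeysv]
          exact List.mem_append_left _ (by simpa [contains_eq_decide] using hcu)
        have hnoop : aStep3Inner u d v = d := by
          rw [hstep, setdefault_of_contains _ _ _ hcru]
          exact insert_self_of_contains d v PySem.Dict.empty (hkeys ▸ hndN) hcdv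
        rw [hnoop]
        apply ih (S ++ [v]) d hTS' hkeys
        intro x
        rw [hrows x]
        congr 1
        by_cases hxv : x = v
        · have hL : ¬(x ∈ S ∧ (pvTgts es x).contains u = false) := by
            rintro ⟨h1, _⟩; exact hvS (hxv ▸ h1)
          have hR : ¬(x ∈ S ++ [v] ∧ (pvTgts es x).contains u = false) := by
            rintro ⟨_, h2⟩
            rw [hxv, hcu] at h2
            exact absurd h2 (by decide)
          rw [if_neg hL, if_neg hR]
        · exact (ite_mem_snoc hxv).symm
      · -- u is appended to v's row with capacity 0
        rw [Bool.not_eq_true] at hcu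
        have hcru : (d.getD v PySem.Dict.empty).contains u = false := by
          rw [Bool.eq_false_iff]
          intro hc
          have hmem := (PySem.Dict.contains_iff_mem_keys _ _).mp hc
          rw [hkeysv, List.mem_append] at hmem
          rcases hmem with h | h
          · rw [contains_eq_decide] at hcu
            simp only [decide_eq_false_iff_not] at hcu
            exact hcu h
          · exact huP (List.mem_filter.mp h).1
        have hstep2 : aStep3Inner u d v =
            d.insert v ((d.getD v PySem.Dict.empty).insert u 0) := by
          rw [hstep, setdefault_of_not_contains _ _ _ hcru]
        rw [hstep2]
        have hkeys' : (d.insert v ((d.getD v PySem.Dict.empty).insert u 0)).keys =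
            pvNodes es := by
          rw [PySem.Dict.keys_insert_of_contains _ _ hcdv]; exact hkeys
        apply ih (S ++ [v]) _ hTS' hkeys'
        intro x
        rw [PySem.Dict.getD_insert]
        by_cases hxv : x = v
        · subst hxv
          rw [if_pos rfl, PySem.Dict.items_insert_of_not_contains _ _ hcru, hrowv,
            if_pos ⟨List.mem_append_right _ List.mem_cons_self, hcu⟩]
        · rw [if_neg hxv, hrows x]
          congr 1
          exact (ite_mem_snoc hxv).symm

lemma a3_step (es : List (String × String × Int)) (P : List String) (u : String)
    (huP : u ∉ P)
    (d : PySem.Dict String (PySem.Dict String Int))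
    (hkeys : d.keys = pvNodes es)
    (hrows : ∀ x, (d.getD x PySem.Dict.empty).items = pvFwd es x ++ pvZeros es P x) :
    (aStep3 d u).keys = pvNodes es ∧
    ∀ x, ((aStep3 d u).getD x PySem.Dict.empty).items =
      pvFwd es x ++ pvZeros es (P ++ [u]) x := by
  have hsnap := row_keys es P u d (hrows u)
  obtain ⟨hk1, hr1⟩ := a3_tgts es u P huP (pvTgts es u) [] d rfl hkeys
    (fun x => by
      rw [hrows x, if_neg (by rintro ⟨h, _⟩; simp at h), List.append_nil])
  set mid := (pvTgts es u).foldl (aStep3Inner u) d with hmid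
  have hnoop : (P.filter (fun w => (pvTgts es w).contains u && !((pvTgts es u).contains w))).foldl
      (aStep3Inner u) mid = mid := by
    apply a3_zeros_noop u _ mid (hk1 ▸ nodup_pvNodes es)
    intro v hv
    have hvf := List.mem_filter.mp hv
    have hprop : u ∈ pvTgts es v ∧ v ∉ pvTgts es u := by
      have h := hvf.2
      simp at h
      exact h
    have hvnode : v ∈ pvNodes es := srcs_sub_nodes (tgts_src hprop.1)
    constructor
    · exact (PySem.Dict.contains_iff_mem_keys _ _).mpr (hk1 ▸ hvnode)
    · have hrowv : (mid.getD v PySem.Dict.empty).items = pvFwd es v ++ pvZeros es P v := by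
        have h := hr1 v
        rw [if_neg (by rintro ⟨h1, _⟩; exact hprop.2 h1), List.append_nil] at h
        exact h
      rw [PySem.Dict.contains_iff_mem_keys, row_keys es P v mid hrowv]
      exact List.mem_append_left _ hprop.1
  have hunfold : aStep3 d u =
      (P.filter (fun w => (pvTgts es w).contains u && !((pvTgts es u).contains w))).foldl
        (aStep3Inner u) mid := by
    show ((d.getD u PySem.Dict.empty).keys).foldl (aStep3Inner u) d = _
    rw [hsnap, List.foldl_append]
  rw [hunfold, hnoop]
  refine ⟨hk1, fun x => ?_⟩
  rw [hr1 x, pvZeros_append, ← List.append_assoc]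
  congr 1
  by_cases h1 : x ∈ pvTgts es u <;> by_cases h2 : u ∈ pvTgts es x <;>
    simp [h1, h2]

lemma a3_outer (es : List (String × String × Int)) :
    ∀ (rest P : List String) (d : PySem.Dict String (PySem.Dict String Int)),
      P ++ rest = pvNodes es →
      d.keys = pvNodes es →
      (∀ x, (d.getD x PySem.Dict.empty).items = pvFwd es x ++ pvZeros es P x) →
      (rest.foldl aStep3 d).keys = pvNodes es ∧
      ∀ x, ((rest.foldl aStep3 d).getD x PySem.Dict.empty).items =
        pvFwd es x ++ pvZeros es (pvNodes es) x := by
  intro rest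
  induction rest with
  | nil =>
      intro P d hP hk hr
      rw [List.append_nil] at hP
      subst hP
      exact ⟨hk, hr⟩
  | cons u rest ih =>
      intro P d hP hk hr
      have huP : u ∉ P := by
        have hnd : (P ++ u :: rest).Nodup := by rw [hP]; exact nodup_pvNodes es
        rw [List.nodup_append] at hnd
        exact fun hmem => hnd.2.2 u hmem u List.mem_cons_self rfl
      rw [List.foldl_cons]
      obtain ⟨hk', hr'⟩ := a3_step es P u huP d hk hr
      exact ih (P ++ [u]) _ (by rw [List.append_assoc]; exact hP) hk' hr'

theorem portA_eq_pvOut (es : List (String × String × Int)) : add_empty_edges es = pvOut es := by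
  have hst : es.foldl aStep1
      ((PySem.Dict.empty : PySem.Dict String (PySem.Dict String Int)),
       (PySem.Set.empty : PySem.Set String)) =
      (pvD1 es, PySem.Set.ofList (pvInter es)) := by
    rw [aFold1_split]
    have h2 : es.foldl (fun s e => PySem.Set.add (PySem.Set.add s e.1) e.2.1)
        (PySem.Set.empty : PySem.Set String) = PySem.Set.ofList (pvInter es) := by
      rw [aNodes_char, PySem.Set.update_empty]
      rfl
    rw [h2]
    rfl
  simp only [add_empty_edges]
  rw [hst]
  show ((pvD2 es).keys.foldl aStep3 (pvD2 es)).items.map (fun p => (p.1, p.2.items)) = pvOut es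
  rw [pvD2_keys]
  obtain ⟨hk3, hr3⟩ := a3_outer es (pvNodes es) [] (pvD2 es) (by rw [List.nil_append])
    (pvD2_keys es) (fun x => by rw [pvD2_rows es x]; simp [pvZeros])
  set d3 := (pvNodes es).foldl aStep3 (pvD2 es) with hd3
  rw [PySem.Dict.items_eq_map_keys d3 (by rw [hk3]; exact nodup_pvNodes es) PySem.Dict.empty,
    hk3, List.map_map, pvOut]
  apply List.map_congr_left
  intro x hx
  show (x, (d3.getD x PySem.Dict.empty).items) = _
  rw [hr3 x]

-- ===== VERDICT (by name: the statement is the Claim_ definition above) =====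
theorem add_empty_edges_spec : Claim_equal_add_empty_edges := by
  intro edges _
  unfold Spec_add_empty_edges
  rw [portA_eq_pvOut, portB_eq_pvOut]
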